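-- pv_equiv track=rewrite | github.com/nancycheng028/Tech-Portfolio | Mines Lab/lab.py | all_possible_coordinates
-- ===== SOURCE A (Python) =====
-- def all_possible_coordinates(dimensions):
--     """A function that returns all possible coordinates in a given board.
--
--     Args:
--         dimensions (tuple):
--
--     Returns:
--         list: list of tuples of all possible coordinates
--     """
--     #base case: 1d board
--     if len(dimensions) == 1:
--         #coordinates_list = []
--         for i in range(dimensions[0]):
--             yield (i, )
--             #coordinates_list.append((i,))
--         #return coordinates_list
--
--     #recursive step:
--     else:
--         first_list = all_possible_coordinates(dimensions[:-1]) #list of tuples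
--         #new_list = []
--         for each_tuple in first_list:
--             for i in range(dimensions[-1]):
--                 new_tuple = each_tuple + (i,)
--                 #new_list.append(new_tuple)
--                 yield new_tuple
-- ===== SOURCE B (Python) =====
-- def all_possible_coordinates(dimensions):
--     """Iterative re-implementation: build the coordinate list front-to-back
--     over the dimensions instead of recursing on dimensions[:-1]."""
--     coords = [()]
--     for dim in dimensions:
--         coords = [t + (i,) for t in coords for i in range(dim)]
--     yield from coords
-- ===== Notes on version B (the rewrite author's own statement) =====
-- stated objective: simpler
-- what changed: Replaced the recursion on dimensions[:-1] (with a separate 1-d base case) by a single iterative front-to-back product fold starting from [()], yielded at the end.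
import Mathlib
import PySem

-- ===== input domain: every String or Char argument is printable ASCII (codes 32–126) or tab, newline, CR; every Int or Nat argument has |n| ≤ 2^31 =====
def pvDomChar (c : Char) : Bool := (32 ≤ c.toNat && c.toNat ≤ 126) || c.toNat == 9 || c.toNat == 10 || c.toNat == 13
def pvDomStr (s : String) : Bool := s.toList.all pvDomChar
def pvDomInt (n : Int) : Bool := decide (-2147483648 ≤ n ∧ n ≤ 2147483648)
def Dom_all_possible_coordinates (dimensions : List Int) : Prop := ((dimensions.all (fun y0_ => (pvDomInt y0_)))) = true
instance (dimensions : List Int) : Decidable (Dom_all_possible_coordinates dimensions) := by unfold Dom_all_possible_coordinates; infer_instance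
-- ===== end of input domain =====

-- B replaces A's recursion on dimensions[:-1] by an iterative front-to-back product fold (simpler decomposition, same cost).


-- ===== PORT A =====
-- A is a generator; its port returns the list of yielded tuples. On the empty
-- tuple A recurses forever (RecursionError); that input is outside Pre_, the
-- port returns [] there only to be total.
def all_possible_coordinates (dimensions : List Int) : List (List Int) :=
  if dimensions.length = 1 then
    (PySem.List.pyRange 0 (dimensions.headD 0) 1).map (fun i => [i])
  else if h : dimensions = [] then []
  else
    (all_possible_coordinates dimensions.dropLast).flatMap
      (fun t => (PySem.List.pyRange 0 (dimensions.getLastD 0) 1).map (fun i => t ++ [i]))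
termination_by dimensions.length
decreasing_by
  simp [List.length_dropLast]
  exact List.length_pos_iff.mpr h

-- ===== PORT B =====
def all_possible_coordinates_alt (dimensions : List Int) : List (List Int) :=
  dimensions.foldl
    (fun coords dim => coords.flatMap (fun t => (PySem.List.pyRange 0 dim 1).map (fun i => t ++ [i])))
    [[]]

-- ===== PRECONDITION & SPEC =====
-- Pre_ excludes only the empty dimensions tuple, on which A recurses forever
-- (RecursionError) and hence returns no value.
def Pre_all_possible_coordinates (dimensions : List Int) : Prop := dimensions ≠ []
instance (dimensions : List Int) : Decidable (Pre_all_possible_coordinates dimensions) := by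
  unfold Pre_all_possible_coordinates; infer_instance
def pvWitness_all_possible_coordinates : List Int := [2, 3]

def Spec_all_possible_coordinates (dimensions : List Int) (out : List (List Int)) : Prop :=
  out = all_possible_coordinates_alt dimensions
instance (dimensions : List Int) (out : List (List Int)) : Decidable (Spec_all_possible_coordinates dimensions out) := by
  unfold Spec_all_possible_coordinates; infer_instance

-- ===== CLAIM (what is proved, stated in full; the proofs are below) =====
def Claim_equal_all_possible_coordinates : Prop := ∀ (dimensions : List Int), Dom_all_possible_coordinates dimensions → Pre_all_possible_coordinates dimensions → Spec_all_possible_coordinates dimensions (all_possible_coordinates dimensions)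

-- ===== LEMMAS AND PROOFS =====

-- B's fold over ds ++ [d] is one more product step after the fold over ds.
theorem alt_append_singleton (ds : List Int) (d : Int) :
    all_possible_coordinates_alt (ds ++ [d]) =
      (all_possible_coordinates_alt ds).flatMap
        (fun t => (PySem.List.pyRange 0 d 1).map (fun i => t ++ [i])) := by
  simp [all_possible_coordinates_alt, List.foldl_append]

theorem a_eq_alt (ds : List Int) (h : ds ≠ []) :
    all_possible_coordinates ds = all_possible_coordinates_alt ds := by
  induction ds using List.reverseRecOn with
  | nil => exact absurd rfl h
  | append_singleton ds d ih =>
    rcases ds with _ | ⟨x, xs⟩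
    · rw [all_possible_coordinates.eq_def]
      simp [all_possible_coordinates_alt]
    · rw [alt_append_singleton]
      have hne : x :: xs ≠ [] := by simp
      rw [all_possible_coordinates.eq_def]
      have hlen : ((x :: xs) ++ [d]).length ≠ 1 := by simp
      simp only [hlen, if_false, List.dropLast_concat, List.getLastD_concat]
      rw [dif_neg (by simp), ih hne]

-- ===== VERDICT (by name: the statement is the Claim_ definition above) =====
theorem all_possible_coordinates_spec : Claim_equal_all_possible_coordinates := by
  intro ds _ hpre
  show _ = _
  exact a_eq_alt ds hpre
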